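-- pv_equiv track=rewrite | github.com/LifeLiveOn/Senior-Design | RF-DETR-model_modified/rf-detr-modifications/rfdetr/datasets/coco.py | compute_multi_scale_scales
-- ===== SOURCE A (Python) =====
-- def compute_multi_scale_scales(resolution, expanded_scales=False, patch_size=16, num_windows=4):
--     # round to the nearest multiple of 4*patch_size to enable both patching and windowing
--     base_num_patches_per_window = resolution // (patch_size * num_windows)
--     offsets = [-3, -2, -1, 0, 1, 2, 3,
--                4] if not expanded_scales else [-5, -4, -3, -2, -1, 0, 1, 2, 3, 4, 5]
--     scales = [base_num_patches_per_window + offset for offset in offsets]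
--     proposed_scales = [scale * patch_size * num_windows for scale in scales]
--     proposed_scales = [scale for scale in proposed_scales if scale >=
--                        patch_size * num_windows * 2]  # ensure minimum image size
--     return proposed_scales
-- ===== SOURCE B (Python) =====
-- def compute_multi_scale_scales(resolution, expanded_scales=False, patch_size=16, num_windows=4):
--     step = patch_size * num_windows
--
--     def gather(scale, remaining):
--         if remaining == 0:
--             return []
--         rest = gather(scale + step, remaining - 1)
--         return ([scale] + rest) if scale >= 2 * step else rest
--
--     if expanded_scales:
--         return gather((resolution // step - 5) * step, 11)
--     return gather((resolution // step - 3) * step, 8)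
-- ===== Notes on version B (the rewrite author's own statement) =====
-- stated objective: alternative
-- what changed: B replaces A's four staged list comprehensions (offsets, shifted scales, multiplied scales, filter) by one recursive single pass that steps the pixel scale additively and keeps a value only when it meets the minimum size; Pre_ excludes patch_size*num_windows == 0, where A raises ZeroDivisionError.
import Mathlib
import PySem

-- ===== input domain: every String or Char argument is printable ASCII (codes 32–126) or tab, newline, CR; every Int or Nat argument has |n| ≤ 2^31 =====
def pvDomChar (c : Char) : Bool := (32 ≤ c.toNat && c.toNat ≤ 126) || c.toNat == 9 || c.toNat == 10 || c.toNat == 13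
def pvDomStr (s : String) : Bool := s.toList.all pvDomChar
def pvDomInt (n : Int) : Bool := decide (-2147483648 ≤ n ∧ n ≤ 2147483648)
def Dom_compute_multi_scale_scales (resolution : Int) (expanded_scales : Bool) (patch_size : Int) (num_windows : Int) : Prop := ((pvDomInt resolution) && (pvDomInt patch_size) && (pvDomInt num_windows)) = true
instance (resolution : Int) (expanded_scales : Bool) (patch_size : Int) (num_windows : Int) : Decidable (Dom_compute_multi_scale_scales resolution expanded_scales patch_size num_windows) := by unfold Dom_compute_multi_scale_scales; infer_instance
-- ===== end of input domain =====

-- B replaces A's staged offsets/scales/filter comprehensions by one recursive pass stepping the scale additively (alternative decomposition, same cost).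

-- ===== PORT A =====
def compute_multi_scale_scales (resolution : Int) (expanded_scales : Bool) (patch_size : Int) (num_windows : Int) : List Int :=
  let base_num_patches_per_window := PySem.Int.floordiv resolution (patch_size * num_windows)
  let offsets : List Int := if !expanded_scales then [-3, -2, -1, 0, 1, 2, 3, 4] else [-5, -4, -3, -2, -1, 0, 1, 2, 3, 4, 5]
  let scales := offsets.map (fun o => base_num_patches_per_window + o)
  let proposed_scales := scales.map (fun s => s * patch_size * num_windows)
  proposed_scales.filter (fun s => decide (patch_size * num_windows * 2 ≤ s))

-- ===== PORT B =====
-- the inner helper 'gather' of Source B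
def pvGather (step : Int) : Int → Nat → List Int
  | _, 0 => []
  | scale, Nat.succ m =>
      let rest := pvGather step (scale + step) m
      if 2 * step ≤ scale then scale :: rest else rest

def compute_multi_scale_scales_alt (resolution : Int) (expanded_scales : Bool) (patch_size : Int) (num_windows : Int) : List Int :=
  let step := patch_size * num_windows
  if expanded_scales then pvGather step ((PySem.Int.floordiv resolution step - 5) * step) 11
  else pvGather step ((PySem.Int.floordiv resolution step - 3) * step) 8

-- ===== PRECONDITION & SPEC =====
-- Pre_ excludes exactly patch_size * num_windows = 0, where Python A raises ZeroDivisionError.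
def Pre_compute_multi_scale_scales (resolution : Int) (expanded_scales : Bool) (patch_size : Int) (num_windows : Int) : Prop := patch_size * num_windows ≠ 0
instance (resolution : Int) (expanded_scales : Bool) (patch_size : Int) (num_windows : Int) : Decidable (Pre_compute_multi_scale_scales resolution expanded_scales patch_size num_windows) := by unfold Pre_compute_multi_scale_scales; infer_instance
def pvWitness_compute_multi_scale_scales : Int × Bool × Int × Int := (640, false, 16, 4)

def Spec_compute_multi_scale_scales (resolution : Int) (expanded_scales : Bool) (patch_size : Int) (num_windows : Int) (out : List Int) : Prop := out = compute_multi_scale_scales_alt resolution expanded_scales patch_size num_windows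
instance (resolution : Int) (expanded_scales : Bool) (patch_size : Int) (num_windows : Int) (out : List Int) : Decidable (Spec_compute_multi_scale_scales resolution expanded_scales patch_size num_windows out) := by unfold Spec_compute_multi_scale_scales; infer_instance

-- ===== CLAIM (what is proved, stated in full; the proofs are below) =====
def Claim_equal_compute_multi_scale_scales : Prop := ∀ (resolution : Int) (expanded_scales : Bool) (patch_size : Int) (num_windows : Int), Dom_compute_multi_scale_scales resolution expanded_scales patch_size num_windows → Pre_compute_multi_scale_scales resolution expanded_scales patch_size num_windows → Spec_compute_multi_scale_scales resolution expanded_scales patch_size num_windows (compute_multi_scale_scales resolution expanded_scales patch_size num_windows)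

-- ===== LEMMAS AND PROOFS =====

-- pvGather is a filter over the arithmetic progression s, s+step, …, s+(n-1)*step
lemma pvGather_eq (step : Int) (s : Int) (n : Nat) :
    pvGather step s n
      = ((List.range n).map (fun (j : Nat) => s + (j : Int) * step)).filter (fun x => decide (2 * step ≤ x)) := by
  induction n generalizing s with
  | zero => rfl
  | succ m ih =>
      rw [List.range_succ_eq_map, List.map_cons, List.map_map, List.filter_cons]
      have hmap : (List.range m).map ((fun (j : Nat) => s + (j : Int) * step) ∘ Nat.succ)
          = (List.range m).map (fun (j : Nat) => (s + step) + (j : Int) * step) := by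
        apply List.map_congr_left
        intro j _
        simp only [Function.comp_apply]
        push_cast
        ring
      rw [hmap, ← ih]
      show pvGather step s (m + 1) = _
      rw [pvGather]
      have h0 : s + ((0 : Nat) : Int) * step = s := by push_cast; ring
      rw [h0]
      by_cases h : 2 * step ≤ s <;> simp [h]

lemma chain_eq (base p w lo : Int) (n : Nat) (hlist : List Int)
    (h : hlist = (List.range n).map (fun (j : Nat) => lo + (j : Int))) :
    (hlist.map (fun o => base + o)).map (fun s => s * p * w)
      = (List.range n).map (fun (j : Nat) => (base + lo) * (p * w) + (j : Int) * (p * w)) := by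
  subst h
  simp only [List.map_map]
  apply List.map_congr_left
  intro j _
  simp [Function.comp]
  ring

-- ===== VERDICT (by name: the statement is the Claim_ definition above) =====
theorem compute_multi_scale_scales_spec : Claim_equal_compute_multi_scale_scales := by
  intro resolution expanded_scales patch_size num_windows _ _
  unfold Spec_compute_multi_scale_scales compute_multi_scale_scales compute_multi_scale_scales_alt
  have hpred : (fun x => decide (patch_size * num_windows * 2 ≤ x))
      = (fun x : Int => decide (2 * (patch_size * num_windows) ≤ x)) := by
    funext x
    rw [decide_eq_decide]
    constructor <;> intro h <;> linarith
  cases expanded_scales with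
  | false =>
      simp only [Bool.not_false, Bool.false_eq_true, reduceIte, if_true]
      rw [chain_eq (PySem.Int.floordiv resolution (patch_size * num_windows)) patch_size num_windows (-3) 8 _ (by decide),
          hpred, ← pvGather_eq]
      have : PySem.Int.floordiv resolution (patch_size * num_windows) + -3
          = PySem.Int.floordiv resolution (patch_size * num_windows) - 3 := by ring
      rw [this]
  | true =>
      simp only [Bool.not_true, Bool.false_eq_true, reduceIte, if_true]
      rw [chain_eq (PySem.Int.floordiv resolution (patch_size * num_windows)) patch_size num_windows (-5) 11 _ (by decide),
          hpred, ← pvGather_eq]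
      have : PySem.Int.floordiv resolution (patch_size * num_windows) + -5
          = PySem.Int.floordiv resolution (patch_size * num_windows) - 5 := by ring
      rw [this]
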